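-- pv_equiv track=rewrite | github.com/mb6ockatf/solutions | ege/it/type19.py | f27750
-- ===== SOURCE A (Python) =====
-- def f27750(x: int, y: int, h: int) -> int:
--     if (h == 3 or h == 5) and x + y >= 82:
--         return 1
--     elif h == 5 and x + y < 82:
--         return 0
--     elif x + y >= 82 and h < 5:
--         return 0
--     else:
--         if h % 2 == 0:
--             return (
--                 f27750(x + 1, y, h + 1)
--                 or f27750(x, y + 1, h + 1)
--                 or f27750(x * 4, y, h + 1)
--                 or f27750(x, y * 4, h + 1)
--             )
--         else:
--             return (
--                 f27750(x + 1, y, h + 1)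
--                 and f27750(x, y + 1, h + 1)
--                 and f27750(x * 4, y, h + 1)
--                 and f27750(x, y * 4, h + 1)
--             )
-- ===== SOURCE B (Python) =====
-- _cache = {}
--
--
-- def f27750(x: int, y: int, h: int) -> int:
--     key = (x, y, h)
--     if key in _cache:
--         return _cache[key]
--     if x + y >= 82:
--         res = 1 if (h == 3 or h == 5) else 0
--     elif h == 5:
--         res = 0
--     else:
--         vals = [
--             f27750(x + 1, y, h + 1),
--             f27750(x, y + 1, h + 1),
--             f27750(x * 4, y, h + 1),
--             f27750(x, y * 4, h + 1),
--         ]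
--         res = max(vals) if h % 2 == 0 else min(vals)
--     _cache[key] = res
--     return res
-- ===== Notes on version B (the rewrite author's own statement) =====
-- stated objective: faster
-- what changed: B merges A's three base-case branches into one x+y>=82 test, combines the four child values with max/min instead of or/and chains, and memoizes results in a module-level dict keyed on (x, y, h), turning the naive game-tree recursion into a DP over distinct states; Pre_ excludes only h_ >= 6 (A never reaches a base case and raises RecursionError) and starts with x+y < 82 and h_ < -980 (recursion depth 6-h_ overflows CPython's default recursion limit, RecursionError, and neither program can return).
import Mathlib
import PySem

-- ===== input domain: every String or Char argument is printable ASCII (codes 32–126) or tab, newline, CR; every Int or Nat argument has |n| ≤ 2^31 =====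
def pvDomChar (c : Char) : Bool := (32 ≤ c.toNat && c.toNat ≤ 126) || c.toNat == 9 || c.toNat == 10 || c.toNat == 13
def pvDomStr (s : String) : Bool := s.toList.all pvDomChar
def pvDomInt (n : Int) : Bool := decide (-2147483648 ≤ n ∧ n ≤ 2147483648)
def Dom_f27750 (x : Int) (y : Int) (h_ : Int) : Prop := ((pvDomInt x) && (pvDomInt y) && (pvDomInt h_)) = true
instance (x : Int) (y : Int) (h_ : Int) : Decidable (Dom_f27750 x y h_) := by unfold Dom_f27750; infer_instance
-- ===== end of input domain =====

-- B replaces A's naive 4-way minimax recursion by a dict-memoized version with merged base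
-- cases and max/min combination (objective: faster on deep games; return VALUE only is compared).

-- ===== PORT A =====
-- Python `a or b` / `a and b` on ints (value semantics)
def pyOr (a b : Int) : Int := if a ≠ 0 then a else b
def pyAnd (a b : Int) : Int := if a = 0 then a else b

-- A's recursion literally, with a fuel parameter: Python A recurses on h+1 and returns only
-- when it reaches a base case at h ≤ 5; fuel (5-h).toNat+1 is exact on Pre_ (h_ ≤ 5).
def f27750Go : Nat → Int → Int → Int → Int
  | 0, _, _, _ => 0
  | n+1, x, y, h =>
    if (h = 3 ∨ h = 5) ∧ x + y ≥ 82 then 1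
    else if h = 5 ∧ x + y < 82 then 0
    else if x + y ≥ 82 ∧ h < 5 then 0
    else if PySem.Int.mod h 2 = 0 then
      pyOr (f27750Go n (x+1) y (h+1)) (pyOr (f27750Go n x (y+1) (h+1))
        (pyOr (f27750Go n (x*4) y (h+1)) (f27750Go n x (y*4) (h+1))))
    else
      pyAnd (f27750Go n (x+1) y (h+1)) (pyAnd (f27750Go n x (y+1) (h+1))
        (pyAnd (f27750Go n (x*4) y (h+1)) (f27750Go n x (y*4) (h+1))))

def f27750 (x : Int) (y : Int) (h_ : Int) : Int := f27750Go ((5 - h_).toNat + 1) x y h_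

-- ===== PORT B =====
-- B's memoization dict, threaded through the recursion (Python's module-level _cache).
def bGo : Nat → PySem.Dict (Int × Int × Int) Int → Int → Int → Int →
    Int × PySem.Dict (Int × Int × Int) Int
  | 0, c, _, _, _ => (0, c)
  | n+1, c, x, y, h =>
    match c.get? (x, y, h) with
    | some v => (v, c)
    | none =>
      let rc :=
        if x + y ≥ 82 then ((if h = 3 ∨ h = 5 then (1 : Int) else 0), c)
        else if h = 5 then ((0 : Int), c)
        else
          let p1 := bGo n c (x+1) y (h+1)
          let p2 := bGo n p1.2 x (y+1) (h+1)
          let p3 := bGo n p2.2 (x*4) y (h+1)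
          let p4 := bGo n p3.2 x (y*4) (h+1)
          ((if PySem.Int.mod h 2 = 0 then max (max (max p1.1 p2.1) p3.1) p4.1
            else min (min (min p1.1 p2.1) p3.1) p4.1), p4.2)
      (rc.1, rc.2.insert (x, y, h) rc.1)

def f27750_alt (x : Int) (y : Int) (h_ : Int) : Int :=
  (bGo ((5 - h_).toNat + 1) PySem.Dict.empty x y h_).1

-- ===== PRECONDITION & SPEC =====
-- Pre_ excludes exactly where A cannot return a value: h_ ≥ 6 (every branch recurses with h
-- growing, no base case is ever reached, A raises RecursionError), and starts with x + y < 82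
-- whose recursion depth 6 - h_ overflows CPython's default recursion limit of 1000
-- (h_ < -980: A raises RecursionError there, and neither program's exponential game tree can
-- be evaluated).  When x + y ≥ 82, A answers any h_ ≤ 5 immediately and is admitted.
def Pre_f27750 (x : Int) (y : Int) (h_ : Int) : Prop :=
  h_ ≤ 5 ∧ (82 ≤ x + y ∨ -980 ≤ h_)
instance (x : Int) (y : Int) (h_ : Int) : Decidable (Pre_f27750 x y h_) := by
  unfold Pre_f27750; infer_instance

def pvWitness_f27750 : Int × Int × Int := (40, 41, 1)

def Spec_f27750 (x : Int) (y : Int) (h_ : Int) (out : Int) : Prop := out = f27750_alt x y h_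
instance (x : Int) (y : Int) (h_ : Int) (out : Int) : Decidable (Spec_f27750 x y h_ out) := by
  unfold Spec_f27750; infer_instance

-- ===== CLAIM (what is proved, stated in full; the proofs are below) =====
def Claim_equal_f27750 : Prop := ∀ (x : Int) (y : Int) (h_ : Int), Dom_f27750 x y h_ → Pre_f27750 x y h_ → Spec_f27750 x y h_ (f27750 x y h_)

-- ===== LEMMAS AND PROOFS =====

-- A's result is always 0 or 1.
theorem f27750Go_zero_one : ∀ (n : Nat) (x y h : Int),
    f27750Go n x y h = 0 ∨ f27750Go n x y h = 1 := by
  intro n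
  induction n with
  | zero => intro x y h; left; rfl
  | succ n ih =>
    intro x y h
    simp only [f27750Go]
    split_ifs
    · right; rfl
    · left; rfl
    · left; rfl
    all_goals
      rcases ih (x+1) y (h+1) with h1 | h1 <;>
      rcases ih x (y+1) (h+1) with h2 | h2 <;>
      rcases ih (x*4) y (h+1) with h3 | h3 <;>
      rcases ih x (y*4) (h+1) with h4 | h4 <;>
      simp [pyOr, pyAnd, h1, h2, h3, h4]

-- In the recursive branch (no base case fired) with h ≤ 5 we have h < 5.
theorem rec_branch_lt (x y h : Int) (hle : h ≤ 5)
    (c1 : ¬ ((h = 3 ∨ h = 5) ∧ x + y ≥ 82))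
    (c2 : ¬ (h = 5 ∧ x + y < 82))
    (c3 : ¬ (x + y ≥ 82 ∧ h < 5)) : h < 5 ∧ x + y < 82 := by
  have hA : ¬ (h = 5 ∧ x + y ≥ 82) := fun hp => c1 ⟨Or.inr hp.1, hp.2⟩
  omega

-- Fuel irrelevance: any fuel strictly above (5-h).toNat gives the same value (h ≤ 5).
theorem f27750Go_fuel : ∀ (n m : Nat) (x y h : Int), h ≤ 5 →
    (5 - h).toNat < n → (5 - h).toNat < m →
    f27750Go n x y h = f27750Go m x y h := by
  intro n
  induction n with
  | zero => intro m x y h _ hn; omega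
  | succ n ih =>
    intro m x y h hle hn hm
    cases m with
    | zero => omega
    | succ m =>
      simp only [f27750Go]
      split_ifs with c1 c2 c3 c4
      · rfl
      · rfl
      · rfl
      all_goals {
        obtain ⟨hlt, _⟩ := rec_branch_lt x y h hle c1 c2 c3
        have h1 := ih m (x+1) y (h+1) (by omega) (by omega) (by omega)
        have h2 := ih m x (y+1) (h+1) (by omega) (by omega) (by omega)
        have h3 := ih m (x*4) y (h+1) (by omega) (by omega) (by omega)
        have h4 := ih m x (y*4) (h+1) (by omega) (by omega) (by omega)
        rw [h1, h2, h3, h4] }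

-- max/min reproduce Python's or/and chains on 0/1 values.
theorem pyOr_chain (a b c d : Int)
    (ha : a = 0 ∨ a = 1) (hb : b = 0 ∨ b = 1) (hc : c = 0 ∨ c = 1) (hd : d = 0 ∨ d = 1) :
    pyOr a (pyOr b (pyOr c d)) = max (max (max a b) c) d := by
  rcases ha with rfl | rfl <;> rcases hb with rfl | rfl <;>
    rcases hc with rfl | rfl <;> rcases hd with rfl | rfl <;> decide

theorem pyAnd_chain (a b c d : Int)
    (ha : a = 0 ∨ a = 1) (hb : b = 0 ∨ b = 1) (hc : c = 0 ∨ c = 1) (hd : d = 0 ∨ d = 1) :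
    pyAnd a (pyAnd b (pyAnd c d)) = min (min (min a b) c) d := by
  rcases ha with rfl | rfl <;> rcases hb with rfl | rfl <;>
    rcases hc with rfl | rfl <;> rcases hd with rfl | rfl <;> decide

-- Cache invariant: every stored value is A's value at its key (and its key has h ≤ 5).
def CacheOK (c : PySem.Dict (Int × Int × Int) Int) : Prop :=
  ∀ x y h v, c.get? (x, y, h) = some v → h ≤ 5 ∧ v = f27750 x y h

theorem cacheOK_empty : CacheOK PySem.Dict.empty := by
  intro x y h v hv
  simp [PySem.Dict.get?_empty] at hv

theorem cacheOK_insert (c : PySem.Dict (Int × Int × Int) Int) (x y h res : Int)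
    (hle : h ≤ 5) (hres : res = f27750 x y h) (hc : CacheOK c) :
    CacheOK (c.insert (x, y, h) res) := by
  intro x' y' h' v' hv'
  rw [PySem.Dict.get?_insert] at hv'
  split_ifs at hv' with he
  · obtain ⟨rfl, rfl, rfl⟩ : x' = x ∧ y' = y ∧ h' = h := by simpa [Prod.ext_iff] using he
    have hvv : res = v' := by injection hv'
    exact ⟨hle, hvv ▸ hres⟩
  · exact hc x' y' h' v' hv'

-- Main invariant lemma: with enough fuel and a correct cache, B computes A's value and
-- keeps the cache correct.
theorem bGo_correct : ∀ (n : Nat) (c : PySem.Dict (Int × Int × Int) Int) (x y h : Int),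
    h ≤ 5 → (5 - h).toNat < n → CacheOK c →
    (bGo n c x y h).1 = f27750 x y h ∧ CacheOK (bGo n c x y h).2 := by
  intro n
  induction n with
  | zero => intro c x y h _ hn; omega
  | succ n ih =>
    intro c x y h hle hn hc
    have hunf : f27750 x y h = f27750Go ((5 - h).toNat + 1) x y h := rfl
    simp only [bGo]
    cases hget : PySem.Dict.get? c (x, y, h) with
    | some v =>
      obtain ⟨_, hv⟩ := hc x y h v hget
      exact ⟨hv, hc⟩
    | none =>
      by_cases hs : x + y ≥ 82
      · -- merged base case, x+y ≥ 82
        have hA : (if h = 3 ∨ h = 5 then (1 : Int) else 0) = f27750 x y h := by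
          rw [hunf]; simp only [f27750Go]
          by_cases h35 : h = 3 ∨ h = 5
          · rw [if_pos h35,
              if_pos (show (h = 3 ∨ h = 5) ∧ x + y ≥ 82 from ⟨h35, hs⟩)]
          · have hlt : h < 5 := by
              have h3 : h ≠ 3 := fun hh => h35 (Or.inl hh)
              have h5 : h ≠ 5 := fun hh => h35 (Or.inr hh)
              omega
            rw [if_neg h35,
              if_neg (show ¬ ((h = 3 ∨ h = 5) ∧ x + y ≥ 82) from fun hp => h35 hp.1),
              if_neg (show ¬ (h = 5 ∧ x + y < 82) from fun hp => absurd hp.2 (by omega)),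
              if_pos (show x + y ≥ 82 ∧ h < 5 from ⟨hs, hlt⟩)]
        simp only [if_pos hs]
        exact ⟨hA, cacheOK_insert c x y h _ hle hA hc⟩
      · by_cases h5 : h = 5
        · -- h = 5, x+y < 82
          have hA : (0 : Int) = f27750 x y h := by
            rw [hunf]; simp only [f27750Go]
            rw [if_neg (show ¬ ((h = 3 ∨ h = 5) ∧ x + y ≥ 82) from fun hp => hs hp.2),
              if_pos (show h = 5 ∧ x + y < 82 from ⟨h5, by omega⟩)]
          simp only [if_neg hs, if_pos h5]
          exact ⟨hA, cacheOK_insert c x y h _ hle hA hc⟩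
        · -- recursive case
          have hlt : h < 5 := by omega
          have hb1 : (5 - (h+1)).toNat < n := by omega
          have hle1 : h + 1 ≤ 5 := by omega
          obtain ⟨e1, k1⟩ := ih c (x+1) y (h+1) hle1 hb1 hc
          obtain ⟨e2, k2⟩ := ih (bGo n c (x+1) y (h+1)).2 x (y+1) (h+1) hle1 hb1 k1
          obtain ⟨e3, k3⟩ := ih (bGo n (bGo n c (x+1) y (h+1)).2 x (y+1) (h+1)).2 (x*4) y (h+1) hle1 hb1 k2
          obtain ⟨e4, k4⟩ := ih (bGo n (bGo n (bGo n c (x+1) y (h+1)).2 x (y+1) (h+1)).2 (x*4) y (h+1)).2 x (y*4) (h+1) hle1 hb1 k3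
          have hc1 : ¬ ((h = 3 ∨ h = 5) ∧ x + y ≥ 82) := fun hp => hs hp.2
          have hc2 : ¬ (h = 5 ∧ x + y < 82) := fun hp => h5 hp.1
          have hc3 : ¬ (x + y ≥ 82 ∧ h < 5) := fun hp => hs hp.1
          have hchild : ∀ x' y', f27750Go ((5 - h).toNat) x' y' (h+1) = f27750 x' y' (h+1) := by
            intro x' y'
            exact f27750Go_fuel ((5 - h).toNat) ((5 - (h+1)).toNat + 1) x' y' (h+1)
              hle1 (by omega) (by omega)
          have hA : f27750 x y h =
              if PySem.Int.mod h 2 = 0 then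
                pyOr (f27750 (x+1) y (h+1)) (pyOr (f27750 x (y+1) (h+1))
                  (pyOr (f27750 (x*4) y (h+1)) (f27750 x (y*4) (h+1))))
              else
                pyAnd (f27750 (x+1) y (h+1)) (pyAnd (f27750 x (y+1) (h+1))
                  (pyAnd (f27750 (x*4) y (h+1)) (f27750 x (y*4) (h+1)))) := by
            rw [hunf]
            conv_lhs => rw [f27750Go]
            have hfuel : (5 - h).toNat + 1 - 1 = (5 - h).toNat := rfl
            rw [if_neg hc1, if_neg hc2, if_neg hc3]
            by_cases hp : PySem.Int.mod h 2 = 0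
            · rw [if_pos hp, if_pos hp, hchild, hchild, hchild, hchild]
            · rw [if_neg hp, if_neg hp, hchild, hchild, hchild, hchild]
          have r1 : f27750 (x+1) y (h+1) = 0 ∨ f27750 (x+1) y (h+1) = 1 :=
            f27750Go_zero_one _ _ _ _
          have r2 : f27750 x (y+1) (h+1) = 0 ∨ f27750 x (y+1) (h+1) = 1 :=
            f27750Go_zero_one _ _ _ _
          have r3 : f27750 (x*4) y (h+1) = 0 ∨ f27750 (x*4) y (h+1) = 1 :=
            f27750Go_zero_one _ _ _ _
          have r4 : f27750 x (y*4) (h+1) = 0 ∨ f27750 x (y*4) (h+1) = 1 :=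
            f27750Go_zero_one _ _ _ _
          have hval : (if PySem.Int.mod h 2 = 0 then
                max (max (max (bGo n c (x+1) y (h+1)).1 (bGo n (bGo n c (x+1) y (h+1)).2 x (y+1) (h+1)).1) (bGo n (bGo n (bGo n c (x+1) y (h+1)).2 x (y+1) (h+1)).2 (x*4) y (h+1)).1) (bGo n (bGo n (bGo n (bGo n c (x+1) y (h+1)).2 x (y+1) (h+1)).2 (x*4) y (h+1)).2 x (y*4) (h+1)).1
              else
                min (min (min (bGo n c (x+1) y (h+1)).1 (bGo n (bGo n c (x+1) y (h+1)).2 x (y+1) (h+1)).1) (bGo n (bGo n (bGo n c (x+1) y (h+1)).2 x (y+1) (h+1)).2 (x*4) y (h+1)).1) (bGo n (bGo n (bGo n (bGo n c (x+1) y (h+1)).2 x (y+1) (h+1)).2 (x*4) y (h+1)).2 x (y*4) (h+1)).1)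
              = f27750 x y h := by
            rw [e1, e2, e3, e4, hA]
            by_cases hp : PySem.Int.mod h 2 = 0
            · rw [if_pos hp, if_pos hp, pyOr_chain _ _ _ _ r1 r2 r3 r4]
            · rw [if_neg hp, if_neg hp, pyAnd_chain _ _ _ _ r1 r2 r3 r4]
          simp only [if_neg hs, if_neg h5]
          exact ⟨hval, cacheOK_insert _ x y h _ hle hval k4⟩

-- ===== VERDICT (by name: the statement is the Claim_ definition above) =====
theorem f27750_spec : Claim_equal_f27750 := by
  unfold Claim_equal_f27750
  intro x y h_ _ hpre
  unfold Spec_f27750 f27750_alt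
  exact (bGo_correct ((5 - h_).toNat + 1) PySem.Dict.empty x y h_ hpre.1
    (Nat.lt_succ_self _) cacheOK_empty).1.symm
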